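-- pv_equiv track=rewrite | github.com/Nitin399-maker/Ipl | main.py | _randomize_caption_spacing
-- ===== SOURCE A (Python) =====
-- def _randomize_caption_spacing(caption: str) -> str:
--     """Add random newlines / spaces between paragraphs for uniqueness."""
--     lines = caption.split("\n")
--     out   = []
--     for line in lines:
--         out.append(line)
--         # Randomly insert 1 or 2 blank lines after each paragraph
--         if line.strip() == "":
--             out.append("")  # double blank
--     return "\n".join(out)
-- ===== SOURCE B (Python) =====
-- def _randomize_caption_spacing(caption: str) -> str:
--     """Single pass over the characters: emit each line as it ends, doubling
--     whitespace-only lines, without building the list of lines."""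
--     out = []
--     buf = []
--     blank = True
--     for ch in caption:
--         if ch == "\n":
--             out.append("".join(buf))
--             out.append("\n")
--             if blank:
--                 out.append("\n")
--             buf = []
--             blank = True
--         else:
--             buf.append(ch)
--             blank = blank and ch.isspace()
--     out.append("".join(buf))
--     if blank:
--         out.append("\n")
--     return "".join(out)
-- ===== Notes on version B (the rewrite author's own statement) =====
-- stated objective: alternative
-- what changed: Replaces split-into-a-list-of-lines / loop / newline-join by a single pass over the characters that emits each line as it ends and doubles whitespace-only lines, never materialising the list of lines.
import Mathlib
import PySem

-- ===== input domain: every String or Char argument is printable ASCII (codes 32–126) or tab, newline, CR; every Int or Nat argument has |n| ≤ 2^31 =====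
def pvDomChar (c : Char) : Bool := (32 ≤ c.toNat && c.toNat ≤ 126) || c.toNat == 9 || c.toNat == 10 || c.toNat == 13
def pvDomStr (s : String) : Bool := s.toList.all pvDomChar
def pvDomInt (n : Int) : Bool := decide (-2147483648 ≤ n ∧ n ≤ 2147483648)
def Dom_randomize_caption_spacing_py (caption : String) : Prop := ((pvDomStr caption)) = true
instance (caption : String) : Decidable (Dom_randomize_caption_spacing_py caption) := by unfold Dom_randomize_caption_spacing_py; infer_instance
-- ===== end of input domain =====

-- B replaces split-into-lines / loop / join by a single character pass that emits
-- each line as it ends, doubling whitespace-only lines (objective: alternative).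


-- ===== PORT A =====
-- lines = caption.split("\n"); for line in lines: out.append(line); if line.strip()=="": out.append(""); return "\n".join(out)
def randomize_caption_spacing_py (caption : String) : String :=
  let lines := PySem.Chars.splitOn caption.toList ['\n']
  let out := lines.foldl (fun out line =>
    let out := out ++ [line]
    if PySem.Chars.strip line = [] then out ++ [([] : List Char)] else out) []
  String.ofList (PySem.Chars.join ['\n'] out)

-- ===== PORT B =====
-- the single pass of Source B: buf = current line so far, blank = 'every char of buf is whitespace', out = emitted chars
def pvAltGo : List Char → List Char → Bool → List Char → List Char
  | [], buf, blank, out => out ++ buf ++ (if blank then ['\n'] else [])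
  | c :: rest, buf, blank, out =>
    if c = '\n' then
      pvAltGo rest [] true (out ++ buf ++ ['\n'] ++ (if blank then ['\n'] else []))
    else
      pvAltGo rest (buf ++ [c]) (blank && PySem.Chars.isspace c) out

def randomize_caption_spacing_py_alt (caption : String) : String :=
  String.ofList (pvAltGo caption.toList [] true [])

-- ===== PRECONDITION & SPEC =====
def Spec_randomize_caption_spacing_py (caption : String) (out : String) : Prop := out = randomize_caption_spacing_py_alt caption
instance (caption : String) (out : String) : Decidable (Spec_randomize_caption_spacing_py caption out) := by unfold Spec_randomize_caption_spacing_py; infer_instance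

-- ===== CLAIM (what is proved, stated in full; the proofs are below) =====
def Claim_equal_randomize_caption_spacing_py : Prop := ∀ (caption : String), Dom_randomize_caption_spacing_py caption → Spec_randomize_caption_spacing_py caption (randomize_caption_spacing_py caption)

-- ===== LEMMAS AND PROOFS =====

-- structural form of splitting on a single character
def pvSplit (a : Char) : List Char → List (List Char)
  | [] => [[]]
  | c :: rest => if c = a then [] :: pvSplit a rest else (pvSplit a rest).modifyHead (c :: ·)

theorem pvSplit_ne_nil (a : Char) (l : List Char) : pvSplit a l ≠ [] := by
  induction l with
  | nil => simp [pvSplit]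
  | cons c rest ih =>
    simp only [pvSplit]
    split_ifs <;> simp_all

theorem pvSplitOn_go_eq (a : Char) (l cur : List Char) (acc : List (List Char))
    (fuel : Nat) (hf : l.length ≤ fuel) :
    PySem.Chars.splitOn.go [a] fuel l cur acc
      = acc.reverse ++ (pvSplit a l).modifyHead (cur.reverse ++ ·) := by
  induction l generalizing cur acc fuel with
  | nil =>
    cases fuel <;> simp [PySem.Chars.splitOn.go, pvSplit, List.modifyHead]
  | cons c rest ih =>
    cases fuel with
    | zero => simp at hf
    | succ f =>
      simp only [PySem.Chars.splitOn.go]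
      by_cases hc : c = a
      · subst hc
        have hpre : List.isPrefixOf [c] (c :: rest) = true := by simp [List.isPrefixOf]
        rw [if_pos hpre]
        have hd : List.drop [c].length (c :: rest) = rest := rfl
        simp only [List.length_cons] at hf
        rw [hd, ih [] (cur.reverse :: acc) f (by omega)]
        simp only [pvSplit, List.reverse_cons, List.append_assoc]
        cases h : pvSplit c rest <;> simp [List.modifyHead]
      · have hpre : List.isPrefixOf [a] (c :: rest) = false := by
          simp [List.isPrefixOf]; exact fun h => absurd h.symm hc
        rw [if_neg (by simp [hpre])]
        simp only [List.length_cons] at hf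
        rw [ih (c :: cur) acc f (by omega)]
        simp only [pvSplit, if_neg hc]
        congr 1
        cases h : pvSplit a rest with
        | nil => exact absurd h (pvSplit_ne_nil a rest)
        | cons x xs => simp [List.modifyHead]

theorem pvSplitOn_eq (a : Char) (l : List Char) :
    PySem.Chars.splitOn l [a] = pvSplit a l := by
  unfold PySem.Chars.splitOn
  rw [pvSplitOn_go_eq a l [] [] (l.length + 1) (by omega)]
  cases h : pvSplit a l <;> simp [List.modifyHead]

-- blankness test: line.strip() == "" is 'every character is whitespace'
theorem pvStrip_eq_nil_iff (cs : List Char) :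
    (PySem.Chars.strip cs = []) ↔ cs.all PySem.Chars.isspace = true := by
  unfold PySem.Chars.strip PySem.Chars.rstrip PySem.Chars.lstrip
  rw [List.reverse_eq_nil_iff, List.dropWhile_eq_nil_iff]
  constructor
  · intro h
    rw [List.all_eq_true]
    intro x hx
    have hx' : x ∈ cs.takeWhile PySem.Chars.isspace ++ cs.dropWhile PySem.Chars.isspace := by
      rw [List.takeWhile_append_dropWhile]; exact hx
    rcases List.mem_append.mp hx' with h1 | h2
    · exact List.mem_takeWhile_imp h1
    · exact h x (List.mem_reverse.mpr h2)
  · intro h x hx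
    exact List.all_eq_true.mp h x (List.dropWhile_subset _ (List.mem_reverse.mp hx))

-- "\n".join on a cons with nonempty tail
theorem pvJoin_cons (x : List Char) (ys : List (List Char)) (hy : ys ≠ []) :
    PySem.Chars.join ['\n'] (x :: ys) = x ++ '\n' :: PySem.Chars.join ['\n'] ys := by
  unfold PySem.Chars.join
  cases ys with
  | nil => exact absurd rfl hy
  | cons z zs => simp [List.intercalate]

-- A's foldl loop as a flatMap
def pvStep (line : List Char) : List (List Char) :=
  if PySem.Chars.strip line = [] then [line, []] else [line]

theorem pvFoldl_eq_flatMap (lines : List (List Char)) (acc : List (List Char)) :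
    lines.foldl (fun out line =>
      let out := out ++ [line]
      if PySem.Chars.strip line = [] then out ++ [([] : List Char)] else out) acc
      = acc ++ lines.flatMap pvStep := by
  induction lines generalizing acc with
  | nil => simp
  | cons l rest ih =>
    simp only [List.foldl_cons, List.flatMap_cons, pvStep]
    rw [ih]
    split_ifs <;> simp

theorem pvFlatMap_ne_nil (lines : List (List Char)) (h : lines ≠ []) :
    lines.flatMap pvStep ≠ [] := by
  cases lines with
  | nil => exact absurd rfl h
  | cons l rest =>
    simp only [List.flatMap_cons, pvStep]
    split_ifs <;> simp

-- A's whole computation on a list of characters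
def pvACore (cs : List Char) : List Char :=
  PySem.Chars.join ['\n'] ((pvSplit '\n' cs).flatMap pvStep)

theorem pvSplit_append_no_nl (buf cs : List Char) (hb : '\n' ∉ buf) :
    pvSplit '\n' (buf ++ cs) = (pvSplit '\n' cs).modifyHead (buf ++ ·) := by
  induction buf with
  | nil =>
    cases h : pvSplit '\n' cs with
    | nil => exact absurd h (pvSplit_ne_nil _ cs)
    | cons x xs => rw [List.nil_append, h]; simp [List.modifyHead]
  | cons b bs ih =>
    simp only [List.mem_cons, not_or] at hb
    simp only [List.cons_append, pvSplit]
    rw [if_neg (fun hh => hb.1 hh.symm), ih hb.2]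
    cases h : pvSplit '\n' cs with
    | nil => exact absurd h (pvSplit_ne_nil _ cs)
    | cons x xs => simp [List.modifyHead]

-- the single-pass invariant: buf is the current line's prefix, blank its blankness
theorem pvAltGo_eq (cs : List Char) : ∀ (buf out : List Char), '\n' ∉ buf →
    pvAltGo cs buf (buf.all PySem.Chars.isspace) out = out ++ pvACore (buf ++ cs) := by
  induction cs with
  | nil =>
    intro buf out hb
    have hs := pvSplit_append_no_nl buf [] hb
    simp only [List.append_nil, pvSplit, List.modifyHead] at hs
    simp only [pvAltGo, pvACore, List.append_nil, hs, List.flatMap_cons,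
      List.flatMap_nil, pvStep, List.append_nil]
    by_cases hbl : buf.all PySem.Chars.isspace = true
    · rw [if_pos ((pvStrip_eq_nil_iff _).mpr hbl), if_pos hbl]
      rw [pvJoin_cons _ [[]] (by simp)]
      simp [PySem.Chars.join, List.intercalate]
    · rw [if_neg (fun h => hbl ((pvStrip_eq_nil_iff _).mp h)), if_neg hbl]
      simp [PySem.Chars.join, List.intercalate]
  | cons c rest ih =>
    intro buf out hb
    by_cases hc : c = '\n'
    · subst hc
      simp only [pvAltGo]
      rw [if_pos trivial]
      have h1 := ih [] (out ++ buf ++ ['\n'] ++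
        (if buf.all PySem.Chars.isspace = true then ['\n'] else [])) (by simp)
      simp only [List.all_nil, List.nil_append] at h1
      rw [h1]
      have hsp : pvSplit '\n' (buf ++ '\n' :: rest) = buf :: pvSplit '\n' rest := by
        rw [pvSplit_append_no_nl buf _ hb]
        simp [pvSplit, List.modifyHead]
      unfold pvACore
      rw [hsp]
      simp only [List.flatMap_cons, pvStep]
      by_cases hbl : buf.all PySem.Chars.isspace = true
      · rw [if_pos ((pvStrip_eq_nil_iff _).mpr hbl), if_pos hbl]
        simp only [List.cons_append, List.nil_append]
        rw [pvJoin_cons buf ([] :: List.flatMap pvStep (pvSplit '\n' rest)) (by simp),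
          pvJoin_cons [] _ (pvFlatMap_ne_nil _ (pvSplit_ne_nil '\n' rest))]
        simp [List.append_assoc]
      · rw [if_neg (fun h => hbl ((pvStrip_eq_nil_iff _).mp h)), if_neg hbl]
        simp only [List.cons_append, List.nil_append]
        rw [pvJoin_cons buf _ (pvFlatMap_ne_nil _ (pvSplit_ne_nil '\n' rest))]
        simp [List.append_assoc]
    · simp only [pvAltGo]
      rw [if_neg hc]
      have hall : (buf ++ [c]).all PySem.Chars.isspace
          = (buf.all PySem.Chars.isspace && PySem.Chars.isspace c) := by
        simp
      rw [← hall, ih (buf ++ [c]) out (by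
        simp only [List.mem_append, List.mem_singleton, not_or]
        exact ⟨hb, fun h => hc h.symm⟩)]
      simp [List.append_assoc]

-- ===== VERDICT (by name: the statement is the Claim_ definition above) =====
theorem randomize_caption_spacing_py_spec : Claim_equal_randomize_caption_spacing_py := by
  intro caption _
  unfold Spec_randomize_caption_spacing_py randomize_caption_spacing_py
    randomize_caption_spacing_py_alt
  have h := pvAltGo_eq caption.toList [] [] (by simp)
  simp only [List.all_nil, List.nil_append] at h
  simp only [pvSplitOn_eq, pvFoldl_eq_flatMap, List.nil_append, h, pvACore]
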